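-- pv_equiv track=rewrite | github.com/aster-rpc/aster-rpc | bindings/python/aster/contract/identity.py | _spanning_tree_dfs
-- ===== SOURCE A (Python) =====
-- def _spanning_tree_dfs(
--     start: str,
--     members: list[str],
--     graph: dict[str, set[str]],
-- ) -> set[tuple[str, str]]:
--     """Compute back-edges within an SCC using DFS from start node.
--
--     Args:
--         start: Starting node (smallest by NFC codepoint).
--         members: All SCC members.
--         graph: Reference graph.
--
--     Returns:
--         Set of (from, to) pairs that are back-edges (should use SELF_REF).
--     """
--     member_set = set(members)
--     visited: set[str] = set()
--     back_edges: set[tuple[str, str]] = set()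
--
--     def dfs(v: str) -> None:
--         visited.add(v)
--         for w in sorted(graph.get(v, set()) & member_set):
--             if w not in visited:
--                 dfs(w)
--             else:
--                 back_edges.add((v, w))
--
--     dfs(start)
--     return back_edges
-- ===== SOURCE B (Python) =====
-- def _spanning_tree_dfs(
--     start: str,
--     members: list[str],
--     graph: dict[str, set[str]],
-- ) -> set[tuple[str, str]]:
--     """Iterative (explicit-stack) DFS computing back-edges within an SCC."""
--     member_set = set(members)
--
--     def nbrs(v: str) -> list[str]:
--         return sorted(graph.get(v, set()) & member_set)
--
--     visited = {start}
--     back_edges: set[tuple[str, str]] = set()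
--     stack = [(start, nbrs(start))]
--     while stack:
--         v, ws = stack[-1]
--         if not ws:
--             stack.pop()
--             continue
--         w, ws = ws[0], ws[1:]
--         stack[-1] = (v, ws)
--         if w in visited:
--             back_edges.add((v, w))
--         else:
--             visited.add(w)
--             stack.append((w, nbrs(w)))
--     return back_edges
-- ===== Notes on version B (the rewrite author's own statement) =====
-- stated objective: alternative
-- what changed: The recursive DFS with a nested closure is replaced by an explicit iterative DFS over a stack of (node, remaining-sorted-neighbors) frames that marks nodes visited on push, removing recursion (and Python's recursion-depth limit) while visiting edges in the identical order.
import Mathlib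
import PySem

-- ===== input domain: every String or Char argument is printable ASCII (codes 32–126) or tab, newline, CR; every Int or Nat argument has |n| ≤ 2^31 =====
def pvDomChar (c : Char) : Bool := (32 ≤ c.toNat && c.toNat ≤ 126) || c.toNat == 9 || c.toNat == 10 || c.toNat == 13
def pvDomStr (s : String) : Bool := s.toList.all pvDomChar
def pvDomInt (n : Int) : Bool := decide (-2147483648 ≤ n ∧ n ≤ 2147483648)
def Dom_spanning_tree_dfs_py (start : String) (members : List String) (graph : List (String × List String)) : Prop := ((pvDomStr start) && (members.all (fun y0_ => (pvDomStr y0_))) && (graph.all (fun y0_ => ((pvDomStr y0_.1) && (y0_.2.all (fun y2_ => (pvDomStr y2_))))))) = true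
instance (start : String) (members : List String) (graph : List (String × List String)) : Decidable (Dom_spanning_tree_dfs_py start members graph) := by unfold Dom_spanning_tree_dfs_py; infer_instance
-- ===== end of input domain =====

-- B replaces A's recursive DFS by an explicit stack-of-frames iterative DFS (mark-on-push),
-- same return value; objective: alternative decomposition without recursion.

-- sorted(graph.get(v, set()) & member_set): shared by both ports (both Pythons compute it the same way)
def pvNbrs (graph : List (String × List String)) (memberSet : List String) (v : String) : List String :=
  PySem.List.sorted
    (PySem.Set.inter (PySem.Set.ofList ((PySem.Dict.mk graph).getD v [])) memberSet)
    (fun x => x) false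

-- ghost measure: number of distinct not-yet-visited strings in `support`
def pvCnt (support visited : List String) : Nat :=
  ((support.filter (fun x => !(PySem.Set.contains visited x))).toFinset).card

-- measure monotonicity (cited by pvLoop's decreasing_by)
theorem pvCnt_le (l l' v v' : List String) (hl : ∀ x ∈ l', x ∈ l)
    (hv : ∀ x ∈ v, x ∈ v') : pvCnt l' v' ≤ pvCnt l v := by
  apply Finset.card_le_card
  intro x hx
  simp only [List.mem_toFinset, List.mem_filter, Bool.not_eq_eq_eq_not, Bool.not_true,
    PySem.Set.contains_eq_listContains, List.contains_eq_mem, decide_eq_false_iff_not] at hx ⊢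
  exact ⟨hl x hx.1, fun h => hx.2 (hv x h)⟩

theorem pvCnt_lt (l l' v v' : List String) (w : String) (hl : ∀ x ∈ l', x ∈ l)
    (hv : ∀ x ∈ v, x ∈ v') (hwl : w ∈ l) (hwv : w ∉ v) (hwv' : w ∈ v') :
    pvCnt l' v' < pvCnt l v := by
  apply Finset.card_lt_card
  constructor
  · intro x hx
    simp only [List.mem_toFinset, List.mem_filter, Bool.not_eq_eq_eq_not, Bool.not_true,
      PySem.Set.contains_eq_listContains, List.contains_eq_mem, decide_eq_false_iff_not] at hx ⊢
    exact ⟨hl x hx.1, fun h => hx.2 (hv x h)⟩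
  · intro hsub
    have hw := hsub (by
      simp only [List.mem_toFinset, List.mem_filter, Bool.not_eq_eq_eq_not, Bool.not_true,
        PySem.Set.contains_eq_listContains, List.contains_eq_mem, decide_eq_false_iff_not]
      exact ⟨hwl, hwv⟩)
    simp only [List.mem_toFinset, List.mem_filter, Bool.not_eq_eq_eq_not, Bool.not_true,
      PySem.Set.contains_eq_listContains, List.contains_eq_mem, decide_eq_false_iff_not] at hw
    exact hw.2 hwv'

-- ===== PORT A =====
-- A's nested `def dfs(v)` with its `for w in sorted(...)` loop, as mutual recursion.
-- The Nat argument is fuel bounding the recursion depth (Python's depth is ≤ members.length + 1,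
-- since every nested dfs call marks a new member visited); it only makes the recursion structural.
mutual
def pvDfsA (graph : List (String × List String)) (memberSet : List String) :
    Nat → String → PySem.Set String × PySem.Set (String × String) →
    PySem.Set String × PySem.Set (String × String)
  | 0, _, st => st
  | Nat.succ f, v, st =>
      pvGoA graph memberSet f (pvNbrs graph memberSet v) v (PySem.Set.add st.1 v, st.2)
termination_by f _ _ => (f, 0)

def pvGoA (graph : List (String × List String)) (memberSet : List String) :
    Nat → List String → String → PySem.Set String × PySem.Set (String × String) →
    PySem.Set String × PySem.Set (String × String)
  | _, [], _, st => st
  | f, w :: rest, v, st =>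
      if !(PySem.Set.contains st.1 w) then
        pvGoA graph memberSet f rest v (pvDfsA graph memberSet f w st)
      else
        pvGoA graph memberSet f rest v (st.1, PySem.Set.add st.2 (v, w))
termination_by f ws _ _ => (f, ws.length + 1)
end

def spanning_tree_dfs_py (start : String) (members : List String)
    (graph : List (String × List String)) : List (String × String) :=
  let memberSet := PySem.Set.ofList members
  (pvDfsA graph memberSet (members.length + 1) start
    ((PySem.Set.empty : PySem.Set String), (PySem.Set.empty : PySem.Set (String × String)))).2

-- ===== PORT B =====
-- Source B's while-loop over a stack of (v, remaining-neighbors) frames; list head = Python stack top.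
def pvLoop (graph : List (String × List String)) (memberSet : List String) :
    List (String × List String) → PySem.Set String × PySem.Set (String × String) →
    PySem.Set String × PySem.Set (String × String)
  | [], st => st
  | (v, ws) :: S, st =>
    match ws with
    | [] => pvLoop graph memberSet S st
    | w :: rest =>
      if PySem.Set.contains st.1 w then
        pvLoop graph memberSet ((v, rest) :: S) (st.1, PySem.Set.add st.2 (v, w))
      else
        pvLoop graph memberSet ((w, pvNbrs graph memberSet w) :: (v, rest) :: S)
          (PySem.Set.add st.1 w, st.2)
termination_by stack st =>
  (pvCnt (memberSet ++ stack.flatMap Prod.snd) st.1, (stack.map (fun fr => fr.2.length + 1)).sum)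
decreasing_by
  · -- pop an exhausted frame
    simp only [List.flatMap_cons, List.nil_append, List.map_cons, List.sum_cons]
    exact Prod.Lex.right _ (by omega)
  · -- w already visited: frame shrinks
    rcases Nat.lt_or_ge (pvCnt (memberSet ++ ((v, rest) :: S).flatMap Prod.snd) st.1)
        (pvCnt (memberSet ++ ((v, w :: rest) :: S).flatMap Prod.snd) st.1) with h | h
    · exact Prod.Lex.left _ _ h
    · have hle : pvCnt (memberSet ++ ((v, rest) :: S).flatMap Prod.snd) st.1 ≤
          pvCnt (memberSet ++ ((v, w :: rest) :: S).flatMap Prod.snd) st.1 := by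
        apply pvCnt_le
        · intro x hx; simp at hx ⊢; tauto
        · intro x hx; exact hx
      have heq : pvCnt (memberSet ++ ((v, rest) :: S).flatMap Prod.snd) st.1 =
          pvCnt (memberSet ++ ((v, w :: rest) :: S).flatMap Prod.snd) st.1 := le_antisymm hle h
      rw [heq]; exact Prod.Lex.right _ (by simp)
  · -- w unvisited: push, but an unvisited string becomes visited
    apply Prod.Lex.left
    apply pvCnt_lt _ _ _ _ w
    · intro x hx
      simp only [List.flatMap_cons, List.mem_append, List.mem_cons] at hx ⊢
      rcases hx with h | h
      · exact Or.inl h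
      · rcases h with h | h
        · refine Or.inl ?_
          obtain ⟨-, h2⟩ : _ ∧ x ∈ memberSet := by
            simpa [pvNbrs, PySem.List.mem_sorted, PySem.Set.mem_inter] using h
          exact h2
        · simp at h ⊢; tauto
    · exact fun x hx => (PySem.Set.mem_add _ _ _).mpr (Or.inl hx)
    · simp
    · intro hmem
      have : PySem.Set.contains st.1 w = true := (PySem.Set.contains_iff _ _).mpr hmem
      simp_all
    · exact (PySem.Set.mem_add _ _ _).mpr (Or.inr rfl)

def spanning_tree_dfs_py_alt (start : String) (members : List String)
    (graph : List (String × List String)) : List (String × String) :=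
  let memberSet := PySem.Set.ofList members
  (pvLoop graph memberSet [(start, pvNbrs graph memberSet start)]
    (PySem.Set.add (PySem.Set.empty : PySem.Set String) start,
     (PySem.Set.empty : PySem.Set (String × String)))).2

-- ===== PRECONDITION & SPEC =====
def Spec_spanning_tree_dfs_py (start : String) (members : List String) (graph : List (String × List String)) (out : List (String × String)) : Prop := out = spanning_tree_dfs_py_alt start members graph
instance (start : String) (members : List String) (graph : List (String × List String)) (out : List (String × String)) : Decidable (Spec_spanning_tree_dfs_py start members graph out) := by unfold Spec_spanning_tree_dfs_py; infer_instance

-- ===== CLAIM (what is proved, stated in full; the proofs are below) =====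
def Claim_equal_spanning_tree_dfs_py : Prop := ∀ (start : String) (members : List String) (graph : List (String × List String)), Dom_spanning_tree_dfs_py start members graph → Spec_spanning_tree_dfs_py start members graph (spanning_tree_dfs_py start members graph)

-- ===== LEMMAS AND PROOFS =====

-- every neighbour produced by pvNbrs is a member
theorem pvNbrs_subset (graph : List (String × List String)) (memberSet : List String)
    (v w : String) (h : w ∈ pvNbrs graph memberSet v) : w ∈ memberSet := by
  obtain ⟨-, h2⟩ : _ ∧ w ∈ memberSet := by
    simpa [pvNbrs, PySem.List.mem_sorted, PySem.Set.mem_inter] using h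
  exact h2

-- the visited set only grows under pvGoA / pvDfsA
theorem pvMono_go (graph : List (String × List String)) (memberSet : List String) :
    ∀ (f : Nat) (ws : List String) (v : String)
      (st : PySem.Set String × PySem.Set (String × String)) (x : String),
      x ∈ st.1 → x ∈ (pvGoA graph memberSet f ws v st).1 := by
  intro f
  induction f with
  | zero =>
    intro ws
    induction ws with
    | nil => intro v st x hx; simpa [pvGoA] using hx
    | cons w rest ih =>
      intro v st x hx
      by_cases hc : w ∈ st.1
      · simpa [pvGoA, hc] using ih v (st.1, PySem.Set.add st.2 (v, w)) x hx
      · simpa [pvGoA, hc, pvDfsA] using ih v st x hx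
  | succ f ihf =>
    intro ws
    induction ws with
    | nil => intro v st x hx; simpa [pvGoA] using hx
    | cons w rest ih =>
      intro v st x hx
      by_cases hc : w ∈ st.1
      · simpa [pvGoA, hc] using ih v (st.1, PySem.Set.add st.2 (v, w)) x hx
      · have hx' : x ∈ (pvDfsA graph memberSet (f + 1) w st).1 := by
          simpa [pvDfsA] using
            ihf (pvNbrs graph memberSet w) w (PySem.Set.add st.1 w, st.2) x
              ((PySem.Set.mem_add _ _ _).mpr (Or.inl hx))
        simpa [pvGoA, hc] using ih v (pvDfsA graph memberSet (f + 1) w st) x hx'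

theorem pvCnt_pos (m v : List String) (w : String) (hm : w ∈ m) (hv : w ∉ v) :
    0 < pvCnt m v := by
  apply Finset.card_pos.mpr
  refine ⟨w, ?_⟩
  simp only [List.mem_toFinset, List.mem_filter, Bool.not_eq_eq_eq_not, Bool.not_true,
    PySem.Set.contains_eq_listContains, List.contains_eq_mem, decide_eq_false_iff_not]
  exact ⟨hm, hv⟩

-- BRIDGE: running the stack loop on a top frame (v, ws) is folding A's inner loop over ws,
-- provided the fuel exceeds the number of unvisited members.
theorem pvBridge (graph : List (String × List String)) (memberSet : List String) :
    ∀ (f : Nat) (ws : List String) (v : String) (S : List (String × List String))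
      (st : PySem.Set String × PySem.Set (String × String)),
      (∀ w ∈ ws, w ∈ memberSet) → pvCnt memberSet st.1 ≤ f →
      pvLoop graph memberSet ((v, ws) :: S) st =
        pvLoop graph memberSet S (pvGoA graph memberSet f ws v st) := by
  intro f
  induction f with
  | zero =>
    intro ws
    induction ws with
    | nil => intro v S st _ _; simp [pvLoop, pvGoA]
    | cons w rest ih =>
      intro v S st hws hcnt
      by_cases hc : w ∈ st.1
      · rw [show pvLoop graph memberSet ((v, w :: rest) :: S) st =
            pvLoop graph memberSet ((v, rest) :: S) (st.1, PySem.Set.add st.2 (v, w)) by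
          simp [pvLoop, hc]]
        rw [ih v S (st.1, PySem.Set.add st.2 (v, w)) (fun x hx => hws x (List.mem_cons_of_mem _ hx)) hcnt]
        simp [pvGoA, hc]
      · exfalso
        have hwv : w ∉ st.1 := hc
        have := pvCnt_pos memberSet st.1 w (hws w (List.mem_cons_self ..)) hwv
        omega
  | succ f ihf =>
    intro ws
    induction ws with
    | nil => intro v S st _ _; simp [pvLoop, pvGoA]
    | cons w rest ih =>
      intro v S st hws hcnt
      by_cases hc : w ∈ st.1
      · rw [show pvLoop graph memberSet ((v, w :: rest) :: S) st =
            pvLoop graph memberSet ((v, rest) :: S) (st.1, PySem.Set.add st.2 (v, w)) by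
          simp [pvLoop, hc]]
        rw [ih v S (st.1, PySem.Set.add st.2 (v, w)) (fun x hx => hws x (List.mem_cons_of_mem _ hx)) hcnt]
        simp [pvGoA, hc]
      · have hwv : w ∉ st.1 := hc
        have hwm : w ∈ memberSet := hws w (List.mem_cons_self ..)
        -- loop pushes the frame for w
        rw [show pvLoop graph memberSet ((v, w :: rest) :: S) st =
            pvLoop graph memberSet ((w, pvNbrs graph memberSet w) :: (v, rest) :: S)
              (PySem.Set.add st.1 w, st.2) by
          simp [pvLoop, hc]]
        have hcnt' : pvCnt memberSet (PySem.Set.add st.1 w) ≤ f := by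
          have hlt : pvCnt memberSet (PySem.Set.add st.1 w) < pvCnt memberSet st.1 :=
            pvCnt_lt memberSet memberSet st.1 (PySem.Set.add st.1 w) w (fun x hx => hx)
              (fun x hx => (PySem.Set.mem_add _ _ _).mpr (Or.inl hx)) hwm hwv
              ((PySem.Set.mem_add _ _ _).mpr (Or.inr rfl))
          omega
        rw [ihf (pvNbrs graph memberSet w) w ((v, rest) :: S) (PySem.Set.add st.1 w, st.2)
          (fun x hx => pvNbrs_subset graph memberSet w x hx) hcnt']
        have hdfs : pvGoA graph memberSet f (pvNbrs graph memberSet w) w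
            (PySem.Set.add st.1 w, st.2) = pvDfsA graph memberSet (f + 1) w st := by
          simp [pvDfsA]
        rw [hdfs]
        have hcnt'' : pvCnt memberSet (pvDfsA graph memberSet (f + 1) w st).1 ≤ f + 1 := by
          have hle : pvCnt memberSet (pvDfsA graph memberSet (f + 1) w st).1 ≤
              pvCnt memberSet (PySem.Set.add st.1 w) := by
            apply pvCnt_le _ _ _ _ (fun x hx => hx)
            intro x hx
            rw [← hdfs]
            exact pvMono_go graph memberSet f (pvNbrs graph memberSet w) w
              (PySem.Set.add st.1 w, st.2) x hx
          omega
        rw [ih v S (pvDfsA graph memberSet (f + 1) w st)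
          (fun x hx => hws x (List.mem_cons_of_mem _ hx)) (by omega : pvCnt memberSet (pvDfsA graph memberSet (f + 1) w st).1 ≤ f + 1)]
        simp [pvGoA, hc]

-- ===== VERDICT (by name: the statement is the Claim_ definition above) =====
theorem spanning_tree_dfs_py_spec : Claim_equal_spanning_tree_dfs_py := by
  intro start members graph _
  unfold Spec_spanning_tree_dfs_py spanning_tree_dfs_py spanning_tree_dfs_py_alt
  show (pvDfsA graph (PySem.Set.ofList members) (members.length + 1) start
      ((PySem.Set.empty : PySem.Set String), (PySem.Set.empty : PySem.Set (String × String)))).2 =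
    (pvLoop graph (PySem.Set.ofList members)
      [(start, pvNbrs graph (PySem.Set.ofList members) start)]
      (PySem.Set.add (PySem.Set.empty : PySem.Set String) start,
       (PySem.Set.empty : PySem.Set (String × String)))).2
  set memberSet := PySem.Set.ofList members
  have hstart : PySem.Set.add (PySem.Set.empty : PySem.Set String) start = [start] := by
    simp [PySem.Set.add, PySem.Set.empty, PySem.Set.contains]
  have hcnt : pvCnt memberSet [start] ≤ members.length := by
    have h1 : pvCnt memberSet [start] ≤ pvCnt memberSet [] :=
      pvCnt_le _ _ _ _ (fun x hx => hx) (fun x hx => by simp at hx)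
    have h2 : pvCnt memberSet [] ≤ memberSet.length := by
      calc pvCnt memberSet [] ≤ memberSet.toFinset.card := by
            apply Finset.card_le_card
            intro x hx
            simp only [List.mem_toFinset, List.mem_filter] at hx ⊢
            exact hx.1
        _ ≤ memberSet.length := List.toFinset_card_le _
    have h3 : memberSet.length ≤ members.length := PySem.Set.length_ofList_le members
    omega
  have hb := pvBridge graph memberSet members.length (pvNbrs graph memberSet start) start []
    ([start], (PySem.Set.empty : PySem.Set (String × String)))
    (fun x hx => pvNbrs_subset graph memberSet start x hx) hcnt
  rw [hstart, hb]
  simp [pvLoop, pvDfsA]
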